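-- pv_equiv track=rewrite | github.com/stefano-gamba/BoxEmbeddingCBM | scripts/check_class_concept_matrix.py | verifica_univocita
-- ===== SOURCE A (Python) =====
-- from collections import defaultdict
--
-- def verifica_univocita(classes, matrix):
--     """
--     Analizza la matrice per trovare firme identiche tra classi diverse.
--     """
--     # Usiamo un dizionario dove:
--     # Key = la stringa della firma (es. "01001...")
--     # Value = lista di nomi delle classi che hanno quella firma
--     signature_map = defaultdict(list)
--
--     for i, cls in enumerate(classes):
--         if i < len(matrix):
--             # Trasformiamo la riga (lista di '0'/'1') in una stringa unica
--             signature_str = "".join(matrix[i])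
--             signature_map[signature_str].append(cls)
--
--     # Filtriamo solo le firme che hanno più di una classe associata
--     duplicates = {sig: names for sig, names in signature_map.items() if len(names) > 1}
--
--     return signature_map, duplicates
-- ===== SOURCE B (Python) =====
-- def verifica_univocita(classes, matrix):
--     # Simpler decomposition: pair each class with its row signature via zip
--     # (which reproduces the i < len(matrix) truncation), dedup the signatures
--     # in first-occurrence order, then collect each group by a per-signature scan.
--     pairs = [("".join(row), cls) for cls, row in zip(classes, matrix)]
--     seen = list(dict.fromkeys(sig for sig, _ in pairs))
--     signature_map = {sig: [c for s, c in pairs if s == sig] for sig in seen}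
--     duplicates = {sig: names for sig, names in signature_map.items() if len(names) > 1}
--     return signature_map, duplicates
-- ===== Notes on version B (the rewrite author's own statement) =====
-- stated objective: simpler
-- what changed: Replaces the index-guarded enumerate loop mutating a defaultdict with a zip-built (signature, class) pair list, ordered dedup of signatures, and a per-signature comprehension collecting each group.
import Mathlib
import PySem

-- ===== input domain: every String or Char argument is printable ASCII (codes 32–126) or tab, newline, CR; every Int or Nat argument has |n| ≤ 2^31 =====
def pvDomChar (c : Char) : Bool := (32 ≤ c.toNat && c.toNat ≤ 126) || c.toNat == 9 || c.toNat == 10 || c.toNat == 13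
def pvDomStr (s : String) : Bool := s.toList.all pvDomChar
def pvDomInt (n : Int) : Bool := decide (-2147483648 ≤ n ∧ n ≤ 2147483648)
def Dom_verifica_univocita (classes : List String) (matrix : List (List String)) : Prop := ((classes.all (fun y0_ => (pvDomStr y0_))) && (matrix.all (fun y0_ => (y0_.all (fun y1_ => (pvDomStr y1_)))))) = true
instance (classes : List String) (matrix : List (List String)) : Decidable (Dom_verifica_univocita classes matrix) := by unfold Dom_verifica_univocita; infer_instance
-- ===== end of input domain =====

-- B replaces the defaultdict pass with zip-pairs + ordered dedup + per-signature collection (simpler decomposition, not faster).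

-- ===== PORT A =====
-- literal port: enumerate loop with index guard, defaultdict-append as Dict.modify;
-- the duplicates dict comprehension is a fold of inserts over the filtered items.
def verifica_univocita (classes : List String) (matrix : List (List String)) : (List (String × List String)) × (List (String × List String)) :=
  let sm : PySem.Dict String (List String) :=
    (PySem.List.enumerate classes 0).foldl (fun d ic =>
      if ic.1 < (matrix.length : Int) then
        match PySem.List.pyGet? matrix ic.1 with
        | some row => d.modify (PySem.Str.join "" row) [] (fun l => l ++ [ic.2])
        | none => d
      else d) PySem.Dict.empty
  let dup : PySem.Dict String (List String) :=
    (sm.items.filter (fun p => decide (1 < p.2.length))).foldl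
      (fun d p => d.insert p.1 p.2) PySem.Dict.empty
  (sm.items, dup.items)

-- ===== PORT B =====
-- B's dict comprehensions range over distinct keys (seen is deduped; sm has nodup keys),
-- so their items lists are exactly these maps/filters.
def verifica_univocita_alt (classes : List String) (matrix : List (List String)) : (List (String × List String)) × (List (String × List String)) :=
  let pairs : List (String × String) :=
    (classes.zip matrix).map (fun cm => (PySem.Str.join "" cm.2, cm.1))
  let seen := PySem.List.dedup (pairs.map (fun p => p.1))
  let sm := seen.map (fun sig => (sig, (pairs.filter (fun p => p.1 == sig)).map (fun p => p.2)))
  (sm, sm.filter (fun p => decide (1 < p.2.length)))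

-- ===== PRECONDITION & SPEC =====
def Spec_verifica_univocita (classes : List String) (matrix : List (List String)) (out : (List (String × List String)) × (List (String × List String))) : Prop := out = verifica_univocita_alt classes matrix
instance (classes : List String) (matrix : List (List String)) (out : (List (String × List String)) × (List (String × List String))) : Decidable (Spec_verifica_univocita classes matrix out) := by unfold Spec_verifica_univocita; infer_instance

-- ===== CLAIM (what is proved, stated in full; the proofs are below) =====
def Claim_equal_verifica_univocita : Prop := ∀ (classes : List String) (matrix : List (List String)), Dom_verifica_univocita classes matrix → Spec_verifica_univocita classes matrix (verifica_univocita classes matrix)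

-- ===== LEMMAS AND PROOFS =====

-- A's enumerate loop over classes with the i < len(matrix) guard is the fold of the
-- modify-step over the zip-derived (signature, class) pairs.
theorem foldA_eq_foldPairs (ms : List (List String)) :
    ∀ (cs : List String) (n : ℕ) (d : PySem.Dict String (List String)),
    (PySem.List.enumerate cs (n : Int)).foldl (fun d ic =>
        if ic.1 < (ms.length : Int) then
          match PySem.List.pyGet? ms ic.1 with
          | some row => d.modify (PySem.Str.join "" row) [] (fun l => l ++ [ic.2])
          | none => d
        else d) d
      = ((cs.zip (ms.drop n)).map (fun cm => (PySem.Str.join "" cm.2, cm.1))).foldl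
          (fun d p => d.modify p.1 [] (fun l => l ++ [p.2])) d := by
  intro cs
  induction cs with
  | nil => intro n d; simp [PySem.List.enumerate]
  | cons c cs ih =>
    intro n d
    rw [PySem.List.enumerate_cons]
    by_cases h : n < ms.length
    · have hdrop : ms.drop n = ms[n] :: ms.drop (n + 1) := List.drop_eq_getElem_cons h
      have hget : PySem.List.pyGet? ms (n : Int) = some ms[n] := by
        rw [PySem.List.pyGet?_natCast]
        simp [List.getElem?_eq_getElem h]
      simp only [hdrop, List.zip_cons_cons, List.map_cons, List.foldl_cons]
      have hlt : ((n : Int)) < (ms.length : Int) := by exact_mod_cast h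
      simp only [hlt, if_pos, hget]
      have : ((n : Int) + 1) = (((n + 1 : ℕ)) : Int) := by push_cast; ring
      rw [this, ih (n + 1)]
    · have hdrop : ms.drop n = [] := List.drop_of_length_le (by omega)
      have hdrop' : ms.drop (n + 1) = [] := List.drop_of_length_le (by omega)
      have hlt : ¬ ((n : Int)) < (ms.length : Int) := by
        intro hc; exact h (by exact_mod_cast hc)
      simp only [hdrop, List.zip_nil_right, List.map_nil, List.foldl_nil, List.foldl_cons]
      rw [if_neg hlt]
      have : ((n : Int) + 1) = (((n + 1 : ℕ)) : Int) := by push_cast; ring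
      rw [this, ih (n + 1), hdrop', List.zip_nil_right]
      simp

-- the items of the defaultdict-style fold: first-occurrence keys, each mapped to its group
theorem items_foldPairs (pairs : List (String × String)) :
    (pairs.foldl (fun d p => d.modify p.1 [] (fun l => l ++ [p.2]))
        (PySem.Dict.empty : PySem.Dict String (List String))).items
      = (PySem.List.dedup (pairs.map (fun p => p.1))).map
          (fun sig => (sig, (pairs.filter (fun p => p.1 == sig)).map (fun p => p.2))) := by
  set sm := pairs.foldl (fun d p => d.modify p.1 [] (fun l => l ++ [p.2]))
      (PySem.Dict.empty : PySem.Dict String (List String)) with hsm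
  have hnd : sm.keys.Nodup := by
    exact PySem.Dict.nodup_keys_foldl_modify_key pairs (fun p => p.1) []
      (fun d p => fun l => l ++ [p.2]) _ (by simp)
  have hkeys : sm.keys = PySem.List.dedup (pairs.map (fun p => p.1)) := by
    rw [hsm, PySem.Dict.keys_foldl_modify_key]
    simp [PySem.Set.update_nil_left]
  have hget : ∀ c, sm.getD c [] = (pairs.filter (fun p => p.1 == c)).map (fun p => p.2) := by
    intro c
    rw [hsm, PySem.Dict.getD_foldl_modify_append]
    simp
  rw [PySem.Dict.items_eq_map_keys sm hnd [], hkeys]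
  apply List.map_congr_left
  intro sig _
  rw [hget]

theorem verifica_univocita_eq (classes : List String) (matrix : List (List String)) :
    verifica_univocita classes matrix = verifica_univocita_alt classes matrix := by
  unfold verifica_univocita verifica_univocita_alt
  have h0 := foldA_eq_foldPairs matrix classes 0 PySem.Dict.empty
  simp only [Nat.cast_zero, List.drop_zero] at h0
  set pairs := (classes.zip matrix).map (fun cm => (PySem.Str.join "" cm.2, cm.1)) with hp
  set smB := (PySem.List.dedup (pairs.map (fun p => p.1))).map
      (fun sig => (sig, (pairs.filter (fun p => p.1 == sig)).map (fun p => p.2))) with hB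
  have hitems : ((PySem.List.enumerate classes 0).foldl (fun d ic =>
      if ic.1 < (matrix.length : Int) then
        match PySem.List.pyGet? matrix ic.1 with
        | some row => d.modify (PySem.Str.join "" row) [] (fun l => l ++ [ic.2])
        | none => d
      else d) (PySem.Dict.empty : PySem.Dict String (List String))).items = smB := by
    rw [h0, items_foldPairs]
  simp only [hitems]
  -- first components now agree; for the second, the insert-fold over the filtered
  -- items (distinct fresh keys) appends them all
  have hndB : (smB.map (fun p => p.1)).Nodup := by
    rw [hB, List.map_map]
    have : ((fun (p : String × List String) => p.1) ∘
        (fun sig => (sig, (pairs.filter (fun p => p.1 == sig)).map (fun p => p.2)))) = id := by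
      funext x; rfl
    rw [this, List.map_id]
    exact PySem.List.nodup_dedup _
  set l := smB.filter (fun p => decide (1 < p.2.length)) with hl
  have hndl : (l.map (fun p => p.1)).Nodup := by
    exact List.Nodup.sublist (List.Sublist.map _ (List.filter_sublist)) hndB
  have hfresh : ∀ p ∈ l, (PySem.Dict.empty : PySem.Dict String (List String)).contains p.1 = false := by
    intro p _; simp
  have := PySem.Dict.items_foldl_insert_fresh (l := l) (k := fun p => p.1) (v := fun p => p.2)
      (d := PySem.Dict.empty) hfresh hndl
  simp only [this]
  simp [hB]
  rfl

-- ===== VERDICT (by name: the statement is the Claim_ definition above) =====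
theorem verifica_univocita_spec : Claim_equal_verifica_univocita := by
  intro classes matrix _
  unfold Spec_verifica_univocita
  exact verifica_univocita_eq classes matrix
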